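-- pv_equiv track=rewrite | github.com/chansooo/Algorithm | BOJ/11333.py | dp
-- ===== SOURCE A (Python) =====
-- dp_list = [0]* 10001
--
-- modul = 1000000007
--
-- def dp(x):
--   if x == 0: return 1
--   if x == 1: return 0
--   if x == 2: return 0
--   if x == 3: return 3
--
--   if dp_list[x] != 0:
--     return dp_list[x]
--
--   result = (3 * dp(x-3))%modul
--   for i in range(4, x+1):
--     if i%3 == 0:
--       result = (result + (4 * dp(x - i)))%modul
--
--   return result
-- ===== SOURCE B (Python) =====
-- def dp(x):
--     if x == 0:
--         return 1
--     if x < 0 or x % 3 != 0: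
--         return 0
--     M = 1000000007
--     # b = g(j) = dp(3j), s = (g(0)+...+g(j-1)) mod M, starting at j = 1
--     b, s = 3, 1
--     for _ in range(2, x // 3 + 1):
--         b, s = (3 * b + 4 * s) % M, (s + b) % M
--     return b
-- ===== Notes on version B (the rewrite author's own statement) =====
-- stated objective: faster
-- what changed: Replaced the memo-less exponential recursion (whose inner loop re-sums all smaller multiples of 3) by a single bottom-up pass over multiples of 3 that carries the current value and a running modular prefix sum, so each step is O(1).
import Mathlib
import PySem

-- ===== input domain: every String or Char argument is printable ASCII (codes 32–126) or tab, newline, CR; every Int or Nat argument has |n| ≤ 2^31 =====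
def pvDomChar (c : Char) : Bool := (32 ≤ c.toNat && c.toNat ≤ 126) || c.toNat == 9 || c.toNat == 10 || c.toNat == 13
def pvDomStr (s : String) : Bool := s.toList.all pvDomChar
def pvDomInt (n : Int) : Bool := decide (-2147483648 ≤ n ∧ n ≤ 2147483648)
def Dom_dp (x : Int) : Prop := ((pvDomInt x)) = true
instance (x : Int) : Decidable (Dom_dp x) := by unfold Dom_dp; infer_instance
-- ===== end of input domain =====

-- B replaces A's memo-less exponential recursion by one bottom-up pass over the
-- multiples of 3 carrying a running modular prefix sum (objective: faster).

-- ===== PORT A =====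
def pvDpList : List Int := List.replicate 10001 0   -- dp_list = [0]*10001 (never written)
def pvModul : Int := 1000000007

-- A's recursion, with fuel (the Python recursion has no structural decrease on Int;
-- each call strictly decreases x by ≥ 3, so fuel x.toNat+1 in `dp` below is never
-- exhausted on 0 ≤ x; on x < 0 Python recurses forever, excluded by Pre_).
-- dp_list[x]: Python raises IndexError out of range (excluded by Pre_); here getD 0.
def dpAux : Nat → Int → Int
  | 0, _ => 0
  | fuel+1, x =>
    if x = 0 then 1
    else if x = 1 then 0
    else if x = 2 then 0
    else if x = 3 then 3
    else if (PySem.List.pyGet? pvDpList x).getD 0 ≠ 0 then (PySem.List.pyGet? pvDpList x).getD 0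
    else
      let result := PySem.Int.mod (3 * dpAux fuel (x - 3)) pvModul
      (PySem.List.pyRange 4 (x + 1) 1).foldl
        (fun r i => if PySem.Int.mod i 3 = 0 then PySem.Int.mod (r + 4 * dpAux fuel (x - i)) pvModul else r)
        result

def dp (x : Int) : Int := dpAux (x.toNat + 1) x

-- ===== PORT B =====
-- one loop step: b, s = (3*b + 4*s) % M, (s + b) % M
def dpAltStep (st : Int × Int) : Int × Int :=
  (PySem.Int.mod (3 * st.1 + 4 * st.2) 1000000007, PySem.Int.mod (st.2 + st.1) 1000000007)

def dpAltLoop : Nat → Int × Int → Int × Int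
  | 0, st => st
  | n+1, st => dpAltLoop n (dpAltStep st)

def dp_alt (x : Int) : Int :=
  if x = 0 then 1
  else if x < 0 ∨ PySem.Int.mod x 3 ≠ 0 then 0
  else (dpAltLoop (PySem.Int.floordiv x 3 - 1).toNat (3, 1)).1

-- ===== PRECONDITION & SPEC =====
-- Pre_ excludes exactly where Python A raises: x < 0 (unbounded recursion →
-- RecursionError) and x > 10000 (dp_list[x] raises IndexError).
def Pre_dp (x : Int) : Prop := 0 ≤ x ∧ x ≤ 10000
instance (x : Int) : Decidable (Pre_dp x) := by unfold Pre_dp; infer_instance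
def pvWitness_dp : Int := 9

def Spec_dp (x : Int) (out : Int) : Prop := out = dp_alt x
instance (x : Int) (out : Int) : Decidable (Spec_dp x out) := by unfold Spec_dp; infer_instance

-- ===== CLAIM (what is proved, stated in full; the proofs are below) =====
def Claim_equal_dp : Prop := ∀ (x : Int), Dom_dp x → Pre_dp x → Spec_dp x (dp x)


-- ===== LEMMAS AND PROOFS =====

-- the value sequence of B: pvG k = dp(3k)
def pvG : Nat → Int
  | 0 => 1
  | j+1 => (dpAltLoop j (3, 1)).1

-- the reference value of the function on Nat inputs
def pvVal (n : Nat) : Int := if n % 3 = 0 then pvG (n / 3) else 0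

theorem pvM_pos : (0:Int) < 1000000007 := by norm_num

theorem emod_emod_M (a : Int) : a % 1000000007 % 1000000007 = a % 1000000007 :=
  Int.emod_emod_of_dvd a dvd_rfl

theorem add_left_emod (a b : Int) : (a % 1000000007 + b) % 1000000007 = (a + b) % 1000000007 := by
  conv_lhs => rw [Int.add_emod, emod_emod_M]
  rw [← Int.add_emod]

theorem mul_right_emod (a b : Int) : (a * (b % 1000000007)) % 1000000007 = a * b % 1000000007 := by
  conv_lhs => rw [Int.mul_emod, emod_emod_M]
  rw [← Int.mul_emod]

theorem add_mul_right_emod (a b c : Int) :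
    (a + b * (c % 1000000007)) % 1000000007 = (a + b * c) % 1000000007 := by
  rw [Int.add_emod a, mul_right_emod, ← Int.add_emod]

theorem list_sum_range (f : Nat → Int) (n : Nat) :
    ((List.range n).map f).sum = ∑ i ∈ Finset.range n, f i := by
  induction n with
  | zero => simp
  | succ m ih =>
    rw [List.range_succ, Finset.sum_range_succ, List.map_append, List.sum_append, ih]
    simp

-- iterate commutes: applying the step once more at the end
theorem dpAltLoop_succ (n : Nat) (st : Int × Int) :
    dpAltLoop (n+1) st = dpAltStep (dpAltLoop n st) := by
  induction n generalizing st with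
  | zero => rfl
  | succ m ih => show dpAltLoop (m+1) (dpAltStep st) = _; rw [ih]; rfl

-- s-component invariant: running prefix sum of pvG, reduced mod M
theorem dpAltLoop_snd (j : Nat) :
    (dpAltLoop j (3, 1)).2 = (∑ i ∈ Finset.range (j+1), pvG i) % 1000000007 := by
  induction j with
  | zero => simp [dpAltLoop, pvG]
  | succ m ih =>
    rw [dpAltLoop_succ]
    show PySem.Int.mod ((dpAltLoop m (3,1)).2 + (dpAltLoop m (3,1)).1) 1000000007 = _
    rw [PySem.Int.mod_eq_emod_of_pos pvM_pos, ih]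
    have h1 : (dpAltLoop m (3,1)).1 = pvG (m+1) := rfl
    rw [h1, add_left_emod]
    congr 1
    exact (Finset.sum_range_succ pvG (m+1)).symm

-- the recurrence pvG satisfies, with the sum un-reduced
theorem pvG_succ (j : Nat) :
    pvG (j+2) = (3 * pvG (j+1) + 4 * ∑ i ∈ Finset.range (j+1), pvG i) % 1000000007 := by
  show (dpAltLoop (j+1) (3,1)).1 = _
  rw [dpAltLoop_succ]
  show PySem.Int.mod (3 * (dpAltLoop j (3,1)).1 + 4 * (dpAltLoop j (3,1)).2) 1000000007 = _
  rw [PySem.Int.mod_eq_emod_of_pos pvM_pos, dpAltLoop_snd]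
  have h1 : (dpAltLoop j (3,1)).1 = pvG (j+1) := rfl
  rw [h1, add_mul_right_emod]

-- dp_list is all zeros, so the memo guard never fires
theorem pvDpList_read (x : Int) : (PySem.List.pyGet? pvDpList x).getD 0 = 0 := by
  cases h : PySem.List.pyGet? pvDpList x with
  | none => rfl
  | some v =>
    have hv : v ∈ pvDpList := PySem.List.mem_of_pyGet?_eq_some _ h
    simp only [pvDpList, List.mem_replicate] at hv
    simp [hv.2]

-- mod-collapsing fold: accumulating (r + h i) % M over a list
theorem fold_mod_sum {α : Type} (h : α → Int) (xs : List α) (t : Int) :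
    xs.foldl (fun r i => (r + h i) % 1000000007) (t % 1000000007)
      = (t + (xs.map h).sum) % 1000000007 := by
  induction xs generalizing t with
  | nil => simp
  | cons x xs ih =>
    simp only [List.foldl_cons, List.map_cons, List.sum_cons]
    rw [add_left_emod, ih, add_assoc]

-- the multiples of 3 in range(4, n+1), as an explicit list
theorem filter_range_mult3 (n : Nat) :
    (PySem.List.pyRange 4 ((n:Int) + 1) 1).filter (fun i => decide (PySem.Int.mod i 3 = 0))
      = (List.range (n / 3 - 1)).map (fun j => ((3*j+6 : Nat) : Int)) := by
  induction n with
  | zero => simp [PySem.List.pyRange_one_eq_nil]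
  | succ m ih =>
    by_cases hm : 4 ≤ (m:Int) + 1
    · have hstep : ((m+1 : Nat) : Int) + 1 = ((m:Int) + 1) + 1 := by push_cast; ring
      rw [hstep, PySem.List.pyRange_one_succ_right (by omega), List.filter_append, ih]
      by_cases h3 : 3 ∣ (m+1)
      · have hdiv : PySem.Int.mod ((m:Int)+1) 3 = 0 := by
          rw [PySem.Int.mod_eq_zero_iff_dvd]
          exact_mod_cast Int.natCast_dvd_natCast.mpr h3
        have hcnt : (m+1) / 3 - 1 = (m / 3 - 1) + 1 := by omega
        have hval : ((m:Int) + 1) = ((3 * (m / 3 - 1) + 6 : Nat) : Int) := by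
          push_cast; omega
        simp only [List.filter_cons, List.filter_nil, hdiv, decide_true, hcnt,
          List.range_succ, List.map_append, List.map_cons, List.map_nil]
        rw [hval]
        simp
      · have hdiv : ¬ PySem.Int.mod ((m:Int)+1) 3 = 0 := by
          rw [PySem.Int.mod_eq_zero_iff_dvd]
          intro hc
          exact h3 (by exact_mod_cast hc)
        have hcnt : (m+1) / 3 - 1 = m / 3 - 1 := by omega
        have hdvd : ¬ (3:Int) ∣ ((m:Int)+1) := by
          intro hc; exact h3 (by exact_mod_cast hc)
        simp [hcnt, hdvd]
    · -- m + 1 ≤ 3: both sides empty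
      have h1 : ((m+1 : Nat) : Int) + 1 ≤ 4 := by push_cast; omega
      have h2 : (m+1) / 3 - 1 = 0 := by omega
      rw [PySem.List.pyRange_one_eq_nil h1, h2]
      simp

-- main lemma for A's port: with enough fuel it computes pvVal
theorem dpAux_eq (fuel : Nat) : ∀ n : Nat, n < fuel → dpAux fuel (n : Int) = pvVal n := by
  induction fuel with
  | zero => intro n hn; exact absurd hn (Nat.not_lt_zero n)
  | succ f ih =>
    intro n hn
    match n with
    | 0 =>
      simp only [Nat.cast_zero, dpAux]
      rw [if_pos trivial]
      decide
    | 1 =>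
      simp only [Nat.cast_one, dpAux]
      rw [if_pos trivial]
      decide
    | 2 =>
      simp only [Nat.cast_ofNat, dpAux]
      rw [if_pos trivial]
      decide
    | 3 =>
      simp only [Nat.cast_ofNat, dpAux]
      rw [if_pos trivial]
      decide
    | (m+4) =>
      have hne0 : ¬ ((m+4 : Nat) : Int) = 0 := by push_cast; omega
      have hne1 : ¬ ((m+4 : Nat) : Int) = 1 := by push_cast; omega
      have hne2 : ¬ ((m+4 : Nat) : Int) = 2 := by push_cast; omega
      have hne3 : ¬ ((m+4 : Nat) : Int) = 3 := by push_cast; omega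
      simp only [dpAux, pvModul, hne0, hne1, hne2, hne3, if_false, pvDpList_read,
        ne_eq, not_true_eq_false]
      have hsub3 : ((m+4 : Nat) : Int) - 3 = ((m+1 : Nat) : Int) := by push_cast; ring
      rw [hsub3, ih (m+1) (by omega), PySem.Int.mod_eq_emod_of_pos pvM_pos]
      have hmods : ∀ (r i : Int),
          PySem.Int.mod (r + 4 * dpAux f (((m+4:Nat):Int) - i)) 1000000007
            = (r + (fun i => 4 * dpAux f (((m+4:Nat):Int) - i)) i) % 1000000007 := by
        intro r i; rw [PySem.Int.mod_eq_emod_of_pos pvM_pos]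
      simp only [hmods]
      rw [PySem.List.foldl_ite_eq_foldl_filter, filter_range_mult3 (m+4),
        fold_mod_sum (fun i => 4 * dpAux f (((m+4:Nat):Int) - i)), List.map_map]
      have hterm : ∀ j ∈ List.range ((m+4)/3 - 1),
          ((fun i => 4 * dpAux f (((m+4:Nat):Int) - i)) ∘ (fun j => ((3*j+6 : Nat) : Int))) j
            = 4 * pvVal (m+4 - (3*j+6)) := by
        intro j hj
        have hj' : j < (m+4)/3 - 1 := List.mem_range.mp hj
        have hcast : ((m+4 : Nat) : Int) - ((3*j+6 : Nat) : Int)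
            = ((m+4 - (3*j+6) : Nat) : Int) := by
          push_cast; omega
        simp only [Function.comp_apply, hcast]
        rw [ih _ (by omega)]
      rw [List.map_congr_left hterm, list_sum_range]
      by_cases h3 : 3 ∣ (m+4)
      · -- n = 3k, k ≥ 2
        obtain ⟨k, hk⟩ := h3
        have hk2 : 2 ≤ k := by omega
        have hval1 : pvVal (m+1) = pvG (k-1) := by
          unfold pvVal
          rw [if_pos (by omega : (m+1) % 3 = 0), (by omega : (m+1)/3 = k-1)]
        have hsum2 : ∑ j ∈ Finset.range ((m+4)/3 - 1), 4 * pvVal (m+4 - (3*j+6))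
            = 4 * ∑ j ∈ Finset.range (k-1), pvG (k-1-1-j) := by
          rw [(by omega : (m+4)/3 - 1 = k-1), Finset.mul_sum]
          apply Finset.sum_congr rfl
          intro j hj
          have hj' : j < k-1 := Finset.mem_range.mp hj
          have hpv : pvVal (m+4 - (3*j+6)) = pvG (k-1-1-j) := by
            unfold pvVal
            rw [if_pos (by omega : (m+4-(3*j+6)) % 3 = 0),
              (by omega : (m+4-(3*j+6))/3 = k-1-1-j)]
          rw [hpv]
        rw [hval1, hsum2, Finset.sum_range_reflect]
        have hvalk : pvVal (m+4) = pvG k := by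
          unfold pvVal
          rw [if_pos (by omega : (m+4) % 3 = 0), (by omega : (m+4)/3 = k)]
        rw [hvalk, (by omega : k = (k-2)+2), pvG_succ (k-2),
          (by omega : k-2+1 = k-1), (by omega : k-2+2-1 = k-1)]
      · -- n not a multiple of 3: everything vanishes
        have hval0 : pvVal (m+1) = 0 := by
          unfold pvVal; rw [if_neg (by omega)]
        have hsum0 : ∑ j ∈ Finset.range ((m+4)/3 - 1), 4 * pvVal (m+4 - (3*j+6)) = 0 := by
          apply Finset.sum_eq_zero
          intro j hj
          have hj' : j < (m+4)/3 - 1 := Finset.mem_range.mp hj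
          unfold pvVal
          rw [if_neg (by omega : ¬ (m+4-(3*j+6)) % 3 = 0)]
          ring
        have hvaln : pvVal (m+4) = 0 := by
          unfold pvVal; rw [if_neg (by omega)]
        rw [hval0, hsum0, hvaln]
        norm_num

-- B's port computes pvVal on nonnegative inputs
theorem dp_alt_eq (n : Nat) : dp_alt (n : Int) = pvVal n := by
  unfold dp_alt pvVal
  rcases Nat.eq_zero_or_pos n with h0 | hpos
  · subst h0; norm_num [pvG]
  · have hne : ¬ ((n : Nat) : Int) = 0 := by
      exact_mod_cast Nat.pos_iff_ne_zero.mp hpos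
    rw [if_neg hne]
    by_cases h3 : 3 ∣ n
    · have hmod : PySem.Int.mod (n:Int) 3 = 0 := by
        rw [PySem.Int.mod_eq_zero_iff_dvd]; exact_mod_cast h3
      rw [if_neg (by
          rintro (hlt | hne)
          · exact absurd hlt (by omega)
          · exact hne hmod),
        if_pos (by obtain ⟨c, hc⟩ := h3; omega : n % 3 = 0)]
      have hfd : PySem.Int.floordiv (n:Int) 3 = ((n/3 : Nat) : Int) := by
        exact_mod_cast PySem.Int.floordiv_natCast n 3
      obtain ⟨c, hc⟩ := h3
      rw [hfd, (by omega : (((n/3 : Nat) : Int) - 1).toNat = n/3 - 1),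
        (by omega : n/3 = (n/3 - 1) + 1)]
      rfl
    · have hmod : ¬ PySem.Int.mod (n:Int) 3 = 0 := by
        rw [PySem.Int.mod_eq_zero_iff_dvd]
        intro hc; exact h3 (by exact_mod_cast hc)
      rw [if_pos (Or.inr hmod), if_neg (by omega : ¬ n % 3 = 0)]

theorem dp_eq_alt (x : Int) (hx : 0 ≤ x) : dp x = dp_alt x := by
  have hx' : ((x.toNat : Nat) : Int) = x := Int.toNat_of_nonneg hx
  calc dp x = dpAux (x.toNat + 1) ((x.toNat : Nat) : Int) := by rw [dp, hx']
    _ = pvVal x.toNat := dpAux_eq _ _ (by omega)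
    _ = dp_alt ((x.toNat : Nat) : Int) := (dp_alt_eq _).symm
    _ = dp_alt x := by rw [hx']

-- ===== VERDICT (by name: the statement is the Claim_ definition above) =====
theorem dp_spec : Claim_equal_dp := by
  intro x _ hpre
  unfold Spec_dp
  exact dp_eq_alt x hpre.1
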